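-- pv_equiv track=rewrite | github.com/moredatarequired/stem-pager | scripts/find_minimal_pairs.py | minimal_pair
-- ===== SOURCE A (Python) =====
-- def minimal_pair(word1, word2):
--     if len(word1) != len(word2):
--         return None
--     difference = None
--     for l, r in zip(word1, word2):
--         if l != r:
--             if difference:
--                 return None
--             else:
--                 difference = (l, r)
--     return difference
-- ===== SOURCE B (Python) =====
-- def minimal_pair(word1, word2):
--     if len(word1) != len(word2):
--         return None
--     n = len(word1)
--     i = 0
--     while i < n and word1[i] == word2[i]:
--         i += 1
--     if i == n:
--         return None
--     # exactly one difference iff everything after the first mismatch is identical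
--     return (word1[i], word2[i]) if word1[i + 1:] == word2[i + 1:] else None
-- ===== Notes on version B (the rewrite author's own statement) =====
-- stated objective: alternative
-- what changed: Replaces A's single-pass accumulator loop with a two-phase approach: skip the common prefix to the first mismatch index, then decide by one direct equality test of the remaining suffixes (no difference accumulator, no per-pair state).
import Mathlib
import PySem

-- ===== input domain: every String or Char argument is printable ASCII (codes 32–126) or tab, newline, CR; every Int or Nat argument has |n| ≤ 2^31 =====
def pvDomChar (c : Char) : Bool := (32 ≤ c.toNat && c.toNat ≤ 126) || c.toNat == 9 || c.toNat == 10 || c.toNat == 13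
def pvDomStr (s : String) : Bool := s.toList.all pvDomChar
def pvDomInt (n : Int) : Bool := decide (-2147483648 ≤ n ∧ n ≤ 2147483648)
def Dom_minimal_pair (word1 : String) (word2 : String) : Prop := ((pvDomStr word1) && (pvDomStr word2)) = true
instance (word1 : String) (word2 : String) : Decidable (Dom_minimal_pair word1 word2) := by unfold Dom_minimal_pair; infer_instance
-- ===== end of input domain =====

-- B replaces A's accumulator loop with a prefix scan to the first mismatch followed by one suffix-equality test; same cost, different decomposition.

-- ===== PORT A =====
-- the 'for l, r in zip(...)' loop with the 'difference' accumulator and early 'return None'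
def pvLoopA : List (Char × Char) → Option (String × String) → Option (String × String)
  | [], difference => difference
  | (l, r) :: rest, difference =>
    if l ≠ r then
      match difference with
      | some _ => none                                   -- 'if difference: return None'
      | none => pvLoopA rest (some (l.toString, r.toString))
    else pvLoopA rest difference

def minimal_pair (word1 : String) (word2 : String) : Option (String × String) :=
  if PySem.Str.len word1 ≠ PySem.Str.len word2 then none
  else pvLoopA (word1.toList.zip word2.toList) none

-- ===== PORT B =====
-- the 'while' loop advancing past the common prefix, fused with the final suffix test:
-- on the first mismatch, word1[i+1:] == word2[i+1:] is the equality of the remaining tails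
def pvScanB : List Char → List Char → Option (String × String)
  | a :: as, b :: bs =>
    if a = b then pvScanB as bs
    else if as = bs then some (a.toString, b.toString) else none
  | _, _ => none                                          -- 'if i == n: return None'

def minimal_pair_alt (word1 : String) (word2 : String) : Option (String × String) :=
  if PySem.Str.len word1 ≠ PySem.Str.len word2 then none
  else pvScanB word1.toList word2.toList

-- ===== PRECONDITION & SPEC =====
def Spec_minimal_pair (word1 : String) (word2 : String) (out : Option (String × String)) : Prop := out = minimal_pair_alt word1 word2
instance (word1 : String) (word2 : String) (out : Option (String × String)) : Decidable (Spec_minimal_pair word1 word2 out) := by unfold Spec_minimal_pair; infer_instance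

-- ===== CLAIM =====
def Claim_equal_minimal_pair : Prop := ∀ (word1 : String) (word2 : String), Dom_minimal_pair word1 word2 → Spec_minimal_pair word1 word2 (minimal_pair word1 word2)

-- ===== LEMMAS AND PROOFS =====
theorem pvLoopA_some (as bs : List Char) (d : String × String) (h : as.length = bs.length) :
    pvLoopA (as.zip bs) (some d) = if as = bs then some d else none := by
  induction as generalizing bs with
  | nil => cases bs <;> simp_all [pvLoopA]
  | cons a t ih =>
    cases bs with
    | nil => simp at h
    | cons b bs =>
      by_cases hab : a = b <;>
        simp_all [pvLoopA, List.zip_cons_cons]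

theorem pvLoopA_eq_scanB (as bs : List Char) (h : as.length = bs.length) :
    pvLoopA (as.zip bs) none = pvScanB as bs := by
  induction as generalizing bs with
  | nil => cases bs <;> simp_all [pvLoopA, pvScanB]
  | cons a t ih =>
    cases bs with
    | nil => simp at h
    | cons b bs =>
      by_cases hab : a = b
      · simp_all [pvLoopA, pvScanB, List.zip_cons_cons]
      · simp only [List.zip_cons_cons, pvLoopA, pvScanB, hab, ne_eq, not_false_eq_true, if_true]
        rw [pvLoopA_some t bs _ (by simpa using h)]
        simp

-- ===== VERDICT =====
theorem minimal_pair_spec : Claim_equal_minimal_pair := by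
  intro word1 word2 _
  unfold Spec_minimal_pair minimal_pair minimal_pair_alt
  split_ifs with h
  · rfl
  · exact pvLoopA_eq_scanB _ _ (by simpa [PySem.Str.len] using h)
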